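-- pv_equiv track=rewrite | github.com/Algorithm-Study-AS/Algorithm-study | 김민서/구현/달력-20207.py | solution
-- ===== SOURCE A (Python) =====
-- def solution(schedule):
--     answer = 0
--     length = 0
--     width = 0
--     calendar = [0] * 366
--
--     for start, end in schedule:
--         for i in range(start, end+1):
--             calendar[i] += 1
--
--     for day in calendar:
--         if day != 0:
--             width = max(width, day)
--             length += 1
--         else:
--             answer += width * length
--             width = 0
--             length = 0
--
--     answer += width * length
--     return answer
-- ===== SOURCE B (Python) =====
-- def solution(schedule):
--     # Difference array: +1 at start, -1 past end, then one prefix-sum scan.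
--     diff = [0] * 367
--     for start, end in schedule:
--         if start <= end:
--             diff[start] += 1
--             diff[end + 1] -= 1
--     answer = 0
--     cur = 0
--     length = 0
--     width = 0
--     for d in diff[:366]:
--         cur += d
--         if cur != 0:
--             if cur > width:
--                 width = cur
--             length += 1
--         else:
--             answer += width * length
--             width = 0
--             length = 0
--     return answer + width * length
-- ===== Notes on version B (the rewrite author's own statement) =====
-- stated objective: faster
-- what changed: Replaces the per-day increment of every scheduled day (O(sum of interval lengths)) by a difference array updated in O(1) per interval and read back by a single prefix-sum scan.
-- outside the precondition, e.g. on solution([(-1, 2)]): A returns 4, B returns 0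
import Mathlib
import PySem

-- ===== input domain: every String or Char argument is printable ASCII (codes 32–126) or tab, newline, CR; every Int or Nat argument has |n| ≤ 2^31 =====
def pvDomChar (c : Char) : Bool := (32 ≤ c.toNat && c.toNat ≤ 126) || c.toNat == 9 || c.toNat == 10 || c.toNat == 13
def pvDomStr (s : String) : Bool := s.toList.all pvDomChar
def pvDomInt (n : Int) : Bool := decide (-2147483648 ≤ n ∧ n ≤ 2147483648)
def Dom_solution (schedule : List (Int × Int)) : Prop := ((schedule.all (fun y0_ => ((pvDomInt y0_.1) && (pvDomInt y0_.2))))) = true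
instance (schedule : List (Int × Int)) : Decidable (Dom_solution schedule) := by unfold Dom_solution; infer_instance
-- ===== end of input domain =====

-- B replaces A's per-day increments by a difference array with one prefix-sum scan (faster); return-value equivalence on day ranges inside 0..365.

-- ===== PORT A =====
-- calendar[i] += 1
def aIncr (c : List Int) (i : Int) : List Int :=
  PySem.List.pySetD c i (PySem.List.pyGetD c i 0 + 1)

-- the double loop filling `calendar`
def aBuild (schedule : List (Int × Int)) (cal : List Int) : List Int :=
  schedule.foldl (fun cal se => (PySem.List.pyRange se.1 (se.2 + 1) 1).foldl aIncr cal) cal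

-- state = (answer, width, length)
def aStep (st : Int × Int × Int) (day : Int) : Int × Int × Int :=
  if day ≠ 0 then (st.1, max st.2.1 day, st.2.2 + 1)
  else (st.1 + st.2.1 * st.2.2, 0, 0)

def solution (schedule : List (Int × Int)) : Int :=
  let cal := aBuild schedule (List.replicate 366 0)
  let st := cal.foldl aStep (0, 0, 0)
  st.1 + st.2.1 * st.2.2

-- ===== PORT B =====
-- diff[start] += 1; diff[end+1] -= 1 (skipping empty intervals)
def bUpd (d : List Int) (se : Int × Int) : List Int :=
  if se.1 ≤ se.2 then
    let d1 := PySem.List.pySetD d se.1 (PySem.List.pyGetD d se.1 0 + 1)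
    PySem.List.pySetD d1 (se.2 + 1) (PySem.List.pyGetD d1 (se.2 + 1) 0 - 1)
  else d

-- state = (cur, answer, width, length)
def bStep (st : Int × Int × Int × Int) (dv : Int) : Int × Int × Int × Int :=
  if st.1 + dv ≠ 0 then
    (st.1 + dv, st.2.1, if st.1 + dv > st.2.2.1 then st.1 + dv else st.2.2.1, st.2.2.2 + 1)
  else (st.1 + dv, st.2.1 + st.2.2.1 * st.2.2.2, 0, 0)

def solution_alt (schedule : List (Int × Int)) : Int :=
  let diff := schedule.foldl bUpd (List.replicate 367 0)
  let st := (PySem.List.slice diff none (some 366)).foldl bStep (0, 0, 0, 0)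
  st.2.1 + st.2.2.1 * st.2.2.2

-- ===== PRECONDITION & SPEC =====
-- Pre_ restricts every non-empty interval to the calendar's natural day domain 0..365: outside it
-- A either raises IndexError (end ≥ 366 or start < -366) or, for -366 ≤ start < 0, silently wraps
-- the negative index onto the end of the calendar — malformed input outside the task's day domain.
def Pre_solution (schedule : List (Int × Int)) : Prop :=
  ∀ p ∈ schedule, p.1 ≤ p.2 → 0 ≤ p.1 ∧ p.2 ≤ 365
instance (schedule : List (Int × Int)) : Decidable (Pre_solution schedule) := by
  unfold Pre_solution; infer_instance

def pvWitness_solution : (List (Int × Int)) := [(1, 3), (10, 10), (2, 5), (20, 3)]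

def Spec_solution (schedule : List (Int × Int)) (out : Int) : Prop := out = solution_alt schedule
instance (schedule : List (Int × Int)) (out : Int) : Decidable (Spec_solution schedule out) := by
  unfold Spec_solution; infer_instance

-- ===== CLAIM (what is proved, stated in full; the proofs are below) =====
def Claim_equal_solution : Prop := ∀ (schedule : List (Int × Int)), Dom_solution schedule → Pre_solution schedule → Spec_solution schedule (solution schedule)

-- ===== LEMMAS AND PROOFS =====

-- `diff` is the discrete derivative of `calendar`
def CalInv (cal diff : List Int) : Prop :=
  cal.length = 366 ∧ diff.length = 367 ∧
  ∀ i : Nat, i < 366 →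
    cal.getD i 0 = (if i = 0 then 0 else cal.getD (i - 1) 0) + diff.getD i 0

lemma aIncr_getD (c : List Int) (i : Int) (hi : 0 ≤ i) (hlen : i < (c.length : Int)) :
    (aIncr c i).length = c.length ∧
    ∀ j : Nat, (aIncr c i).getD j 0 = c.getD j 0 + (if (j : Int) = i then 1 else 0) := by
  unfold aIncr
  rw [PySem.List.pySetD_of_nonneg _ _ hi, PySem.List.pyGetD_eq_getElem _ _ hi hlen]
  refine ⟨by simp, fun j => ?_⟩
  by_cases hj : j = i.toNat
  · subst hj
    rw [List.getD_eq_getElem?_getD, List.getElem?_set_self (by omega), List.getD_eq_getElem?_getD,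
      List.getElem?_eq_getElem (by omega), if_pos (by omega : ((i.toNat : Nat) : Int) = i)]
    simp
  · rw [List.getD_eq_getElem?_getD, List.getElem?_set_ne (by omega), ← List.getD_eq_getElem?_getD]
    rw [if_neg (by omega)]
    omega

lemma aRange_getD (n : Nat) : ∀ (s e : Int) (c : List Int), (e + 1 - s).toNat = n →
    0 ≤ s → e < (c.length : Int) →
    ((PySem.List.pyRange s (e + 1) 1).foldl aIncr c).length = c.length ∧
    ∀ j : Nat, ((PySem.List.pyRange s (e + 1) 1).foldl aIncr c).getD j 0 =
      c.getD j 0 + (if s ≤ (j : Int) ∧ (j : Int) ≤ e then 1 else 0) := by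
  induction n with
  | zero =>
    intro s e c hn hs he
    rw [PySem.List.pyRange_one_eq_nil (by omega), List.foldl_nil]
    exact ⟨rfl, fun j => by rw [if_neg (by omega)]; omega⟩
  | succ m ih =>
    intro s e c hn hs he
    rw [PySem.List.pyRange_one_cons (by omega), List.foldl_cons]
    obtain ⟨hl1, hg1⟩ := aIncr_getD c s hs (by omega)
    obtain ⟨hl2, hg2⟩ := ih (s + 1) e (aIncr c s) (by omega) (by omega) (by omega)
    refine ⟨by omega, fun j => ?_⟩
    rw [hg2 j, hg1 j]
    by_cases hj : (j : Int) = s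
    · rw [if_pos hj, if_neg (by omega), if_pos (by omega)]; ring
    · rw [if_neg hj]
      by_cases hj2 : s + 1 ≤ (j : Int) ∧ (j : Int) ≤ e
      · rw [if_pos hj2, if_pos (by omega)]; ring
      · rw [if_neg hj2, if_neg (by omega)]; ring

lemma bUpd_getD (d : List Int) (s e : Int) (hse : s ≤ e) (hs : 0 ≤ s) (he : e ≤ 365)
    (hlen : d.length = 367) :
    (bUpd d (s, e)).length = 367 ∧
    ∀ j : Nat, (bUpd d (s, e)).getD j 0 =
      d.getD j 0 + (if (j : Int) = s then 1 else 0) - (if (j : Int) = e + 1 then 1 else 0) := by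
  unfold bUpd
  rw [if_pos (by simpa using hse)]
  simp only
  rw [PySem.List.pySetD_of_nonneg _ _ hs, PySem.List.pySetD_of_nonneg _ _ (by omega),
    PySem.List.pyGetD_eq_getElem _ _ hs (by simp [hlen]; omega),
    PySem.List.pyGetD_eq_getElem _ _ (by omega : (0:Int) ≤ e + 1) (by simp [hlen]; omega)]
  refine ⟨by simp [hlen], fun j => ?_⟩
  have hne : s.toNat ≠ (e + 1).toNat := by omega
  by_cases hj1 : j = s.toNat
  · subst hj1
    rw [List.getD_eq_getElem?_getD, List.getElem?_set_ne (by omega), List.getElem?_set_self (by simp [hlen]; omega)]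
    rw [List.getD_eq_getElem?_getD, List.getElem?_eq_getElem (by simp [hlen]; omega)]
    rw [if_pos (by omega), if_neg (by omega)]
    simp
  · by_cases hj2 : j = (e + 1).toNat
    · subst hj2
      rw [List.getD_eq_getElem?_getD, List.getElem?_set_self (by simp [hlen]; omega)]
      have : (d.set s.toNat (d[s.toNat]'(by simp [hlen]; omega) + 1))[(e+1).toNat]'(by simp [hlen]; omega) = d[(e+1).toNat]'(by simp [hlen]; omega) := by
        rw [List.getElem_set_ne (by omega)]
      rw [this, List.getD_eq_getElem?_getD, List.getElem?_eq_getElem (by simp [hlen]; omega)]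
      rw [if_neg (by omega), if_pos (by omega)]
      simp
    · rw [List.getD_eq_getElem?_getD, List.getElem?_set_ne (by omega), List.getElem?_set_ne (by omega),
        ← List.getD_eq_getElem?_getD, if_neg (by omega), if_neg (by omega)]
      omega

lemma inv_step (cal diff : List Int) (s e : Int) (hp : s ≤ e → 0 ≤ s ∧ e ≤ 365)
    (h : CalInv cal diff) :
    CalInv ((PySem.List.pyRange s (e + 1) 1).foldl aIncr cal) (bUpd diff (s, e)) := by
  obtain ⟨hc, hd, hrel⟩ := h
  by_cases hse : s ≤ e
  · obtain ⟨hs, he⟩ := hp hse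
    obtain ⟨hl1, hg1⟩ := aRange_getD (e + 1 - s).toNat s e cal rfl hs (by omega)
    obtain ⟨hl2, hg2⟩ := bUpd_getD diff s e hse hs he hd
    refine ⟨by omega, hl2, fun i hi => ?_⟩
    rw [hg1 i, hg2 i]
    by_cases hi0 : i = 0
    · subst hi0
      have h0 := hrel 0 (by omega)
      rw [if_pos rfl] at h0
      rw [if_pos rfl]
      split_ifs <;> omega
    · have hr := hrel i hi
      rw [if_neg hi0] at hr
      rw [if_neg hi0, hg1 (i - 1)]
      have hcast : ((i - 1 : Nat) : Int) = (i : Int) - 1 := by omega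
      rw [hcast]
      split_ifs <;> omega
  · rw [PySem.List.pyRange_one_eq_nil (by omega), List.foldl_nil]
    unfold bUpd
    rw [if_neg (by simpa using hse)]
    exact ⟨hc, hd, hrel⟩

lemma build_inv : ∀ (sch : List (Int × Int)) (cal diff : List Int),
    (∀ p ∈ sch, p.1 ≤ p.2 → 0 ≤ p.1 ∧ p.2 ≤ 365) → CalInv cal diff →
    CalInv (aBuild sch cal) (sch.foldl bUpd diff) := by
  intro sch
  induction sch with
  | nil => intro cal diff _ h; exact h
  | cons p t ih =>
    intro cal diff hp h
    unfold aBuild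
    rw [List.foldl_cons, List.foldl_cons]
    have step := inv_step cal diff p.1 p.2 (hp p (by simp)) h
    have : bUpd diff (p.1, p.2) = bUpd diff p := by rfl
    rw [this] at step
    exact ih _ _ (fun q hq => hp q (by simp [hq])) step

lemma calinv_zero : CalInv (List.replicate 366 (0:Int)) (List.replicate 367 (0:Int)) := by
  have h : ∀ (n j : Nat), (List.replicate n (0:Int)).getD j 0 = 0 := by
    intro n j
    rw [List.getD_eq_getElem?_getD, List.getElem?_replicate]
    split <;> rfl
  refine ⟨List.length_replicate, List.length_replicate, fun i hi => ?_⟩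
  rw [h, h, h]
  split <;> rfl

-- scan equivalence: A folds over the calendar, B folds over its discrete derivative
lemma scan_eq : ∀ (cal diff : List Int) (cur a w l : Int),
    cal.length = diff.length →
    (∀ i : Nat, i < cal.length →
      cal.getD i 0 = (if i = 0 then cur else cal.getD (i - 1) 0) + diff.getD i 0) →
    (cal.foldl aStep (a, w, l)) =
      ((diff.foldl bStep (cur, a, w, l)).2.1, (diff.foldl bStep (cur, a, w, l)).2.2.1,
        (diff.foldl bStep (cur, a, w, l)).2.2.2) := by
  intro cal
  induction cal with
  | nil =>
    intro diff cur a w l hlen _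
    rw [List.length_nil] at hlen
    rw [List.eq_nil_of_length_eq_zero hlen.symm]
    rfl
  | cons c ct ih =>
    intro diff cur a w l hlen hrel
    match diff with
    | [] => simp at hlen
    | d :: dt =>
      have h0 : c = cur + d := by simpa using hrel 0 (by simp)
      rw [List.foldl_cons, List.foldl_cons]
      have hstep : bStep (cur, a, w, l) d = (c, (aStep (a, w, l) c).1, (aStep (a, w, l) c).2.1, (aStep (a, w, l) c).2.2) := by
        unfold bStep aStep
        simp only [← h0]
        by_cases hc : c ≠ 0
        · rw [if_pos hc, if_pos hc]
          simp only [Prod.mk.injEq, true_and, and_true]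
          by_cases hcw : c > w
          · rw [if_pos hcw, max_eq_right (by omega)]
          · rw [if_neg hcw, max_eq_left (by omega)]
        · rw [if_neg hc, if_neg hc]
      rw [hstep]
      exact ih dt c _ _ _ (by simpa using hlen) (fun i hi => by
        have h1 := hrel (i + 1) (by simp; omega)
        simp only [List.getD_cons_succ, Nat.add_sub_cancel] at h1
        rw [h1, if_neg (Nat.succ_ne_zero i)]
        by_cases hi0 : i = 0
        · subst hi0
          rw [if_pos rfl]
          rfl
        · obtain ⟨j, rfl⟩ : ∃ j, i = j + 1 := ⟨i - 1, by omega⟩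
          rw [if_neg hi0, List.getD_cons_succ, Nat.add_sub_cancel])

lemma getD_take_eq (xs : List Int) (n i : Nat) (hi : i < n) :
    (xs.take n).getD i 0 = xs.getD i 0 := by
  rw [List.getD_eq_getElem?_getD, List.getD_eq_getElem?_getD, List.getElem?_take_of_lt hi]

-- ===== VERDICT (by name: the statement is the Claim_ definition above) =====
theorem solution_spec : Claim_equal_solution := by
  intro schedule _ hpre
  unfold Spec_solution solution solution_alt
  simp only
  obtain ⟨hc, hd, hrel⟩ := build_inv schedule _ _ hpre calinv_zero
  have hslice : PySem.List.slice (schedule.foldl bUpd (List.replicate 367 0)) none (some 366) =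
      (schedule.foldl bUpd (List.replicate 367 0)).take 366 := by
    rw [PySem.List.slice_to _ (by omega)]
    rfl
  rw [hslice]
  set cal := aBuild schedule (List.replicate 366 0) with hcal
  set diff := schedule.foldl bUpd (List.replicate 367 (0:Int)) with hdiff
  have hscan := scan_eq cal (diff.take 366) 0 0 0 0
    (by rw [hc, List.length_take, hd]; omega)
    (fun i hi => by
      rw [hc] at hi
      rw [getD_take_eq _ _ _ hi]
      by_cases hi0 : i = 0
      · subst hi0; exact hrel 0 (by omega)
      · rw [if_neg hi0]
        have h := hrel i hi
        rw [if_neg hi0] at h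
        exact h)
  rw [hscan]
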